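-- pv_equiv track=rewrite | github.com/angelo-soyannwo/Python_Basics_A_Self-Teaching_Introduction | Chapter 6/gp.py | gp
-- ===== SOURCE A (Python) =====
-- def gp(a, r, n):
-- 	if n == 0:
-- 		yield 0
-- 	elif n == 1:
-- 		yield a
-- 	else:
-- 		for i in range(n):
-- 			yield a * r**i
-- ===== SOURCE B (Python) =====
-- def gp(a, r, n):
--     term = a
--     for _ in range(n):
--         yield term
--         term *= r
-- ===== Notes on version B (the rewrite author's own statement) =====
-- stated objective: faster
-- what changed: B keeps a running product and multiplies the previous term by r each step instead of recomputing a*r**i from scratch per term, and drops A's branch structure.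
-- intended difference: For n == 0 A yields the literal 0 (returning [0]) while B yields nothing (returning []); an empty geometric progression is the intended value for zero requested terms. — e.g. on gp(2, 3, 0): A returns [0], B returns []
import Mathlib
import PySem

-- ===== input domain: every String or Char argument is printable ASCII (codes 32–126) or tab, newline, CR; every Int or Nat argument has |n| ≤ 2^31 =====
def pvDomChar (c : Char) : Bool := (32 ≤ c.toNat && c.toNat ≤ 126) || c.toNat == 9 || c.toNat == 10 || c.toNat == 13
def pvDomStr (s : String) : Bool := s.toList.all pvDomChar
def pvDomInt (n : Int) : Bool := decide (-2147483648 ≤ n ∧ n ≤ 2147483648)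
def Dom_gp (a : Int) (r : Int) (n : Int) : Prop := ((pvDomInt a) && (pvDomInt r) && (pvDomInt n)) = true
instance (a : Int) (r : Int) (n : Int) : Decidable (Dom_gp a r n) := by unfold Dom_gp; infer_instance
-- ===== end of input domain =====

-- B replaces A's per-term power a*r**i by an O(n) running product (term *= r); for n == 0, A yields the
-- literal 0 while B yields nothing — the intended empty progression (stated as D_gp below).


-- ===== PORT A =====
-- if n == 0: yield 0; elif n == 1: yield a; else: for i in range(n): yield a * r**i
def gp (a : Int) (r : Int) (n : Int) : List Int :=
  if n = 0 then [0]
  else if n = 1 then [a]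
  else (PySem.List.pyRange 0 n 1).map (fun i => a * r ^ i.toNat)

-- ===== PORT B =====
-- term = a; repeat n times: yield term; term *= r
def gpAltLoop (r : Int) (term : Int) : Nat → List Int
  | 0 => []
  | k + 1 => term :: gpAltLoop r (term * r) k

def gp_alt (a : Int) (r : Int) (n : Int) : List Int :=
  gpAltLoop r a n.toNat

-- ===== PRECONDITION & SPEC =====
-- For n == 0 A yields the literal 0 (returning [0]) while B yields nothing ([]); an empty
-- geometric progression is the intended value for zero requested terms.
def D_gp (a : Int) (r : Int) (n : Int) : Prop := n = 0
instance (a : Int) (r : Int) (n : Int) : Decidable (D_gp a r n) := by unfold D_gp; infer_instance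

def Spec_gp (a : Int) (r : Int) (n : Int) (out : List Int) : Prop := ¬ D_gp a r n → out = gp_alt a r n
instance (a : Int) (r : Int) (n : Int) (out : List Int) : Decidable (Spec_gp a r n out) := by unfold Spec_gp; infer_instance

def pvDiffWitness_gp : Int × Int × Int := (2, 3, 0)
def pvDiffWitnessOut_gp : (List Int) × (List Int) := ([0], [])

-- ===== CLAIM (what is proved, stated in full; the proofs are below) =====
def Claim_unchanged_gp : Prop := ∀ (a : Int) (r : Int) (n : Int), Dom_gp a r n → Spec_gp a r n (gp a r n)
def Claim_changed_gp : Prop := Dom_gp (pvDiffWitness_gp.1) (pvDiffWitness_gp.2.1) (pvDiffWitness_gp.2.2) ∧ D_gp (pvDiffWitness_gp.1) (pvDiffWitness_gp.2.1) (pvDiffWitness_gp.2.2) ∧ gp (pvDiffWitness_gp.1) (pvDiffWitness_gp.2.1) (pvDiffWitness_gp.2.2) = pvDiffWitnessOut_gp.1 ∧ gp_alt (pvDiffWitness_gp.1) (pvDiffWitness_gp.2.1) (pvDiffWitness_gp.2.2) = pvDiffWitnessOut_gp.2 ∧ pvDiffWitnessOut_gp.1 ≠ pvDiffWitnessOut_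gp.2
def Claim_exact_gp : Prop := ∀ (a : Int) (r : Int) (n : Int), Dom_gp a r n → D_gp a r n → gp a r n ≠ gp_alt a r n

-- ===== LEMMAS AND PROOFS =====
-- The running product unrolls to the closed powers A computes.
theorem gpAltLoop_eq_map_range (r : Int) (k : Nat) : ∀ a : Int,
    gpAltLoop r a k = (List.range k).map (fun j => a * r ^ j) := by
  induction k with
  | zero => intro a; rfl
  | succ k ih =>
      intro a
      simp only [gpAltLoop, List.range_succ_eq_map, List.map_cons, List.map_map, ih (a * r)]
      congr 1
      · simp
      · apply List.map_congr_left
        intro j _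
        simp [Function.comp, pow_succ]
        ring

-- ===== VERDICT (by name: the statement is the Claim_ definition above) =====
theorem gp_spec : Claim_unchanged_gp := by
  intro a r n _ hD
  have hn : n ≠ 0 := hD
  by_cases h1 : n = 1
  · subst h1; simp [gp, gp_alt, gpAltLoop]
  · simp only [gp, gp_alt, if_neg hn, if_neg h1,
      PySem.List.pyRange_one, gpAltLoop_eq_map_range, List.map_map, sub_zero]
    apply List.map_congr_left
    intro j _
    simp

theorem gp_changed : Claim_changed_gp := by unfold Claim_changed_gp; decide

theorem gp_tight : Claim_exact_gp := by
  intro a r n _ hD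
  subst hD
  simp [gp, gp_alt, gpAltLoop]
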